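-- pv_equiv track=rewrite | github.com/MrBrantCode/unitest_baseline | mut_generate/mist_train_cf/cf_11413/solution.py | sort_negative_numbers
-- ===== SOURCE A (Python) =====
-- def sort_negative_numbers(lst):
--     negative_nums = [num for num in lst if num < 0]
--     n = len(negative_nums)
--
--     # Implement Bubble Sort algorithm
--     for i in range(n - 1):
--         for j in range(n - i - 1):
--             if negative_nums[j] > negative_nums[j + 1]:
--                 negative_nums[j], negative_nums[j + 1] = negative_nums[j + 1], negative_nums[j]
--
--     return negative_nums
-- ===== SOURCE B (Python) =====
-- def sort_negative_numbers(lst):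
--     return sorted(num for num in lst if num < 0)
-- ===== Notes on version B (the rewrite author's own statement) =====
-- stated objective: faster
-- what changed: Replaces the hand-written bubble sort of the filtered negatives with a single call to the built-in sorted() on a generator, removing the quadratic adjacent-swap passes.
import Mathlib
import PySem

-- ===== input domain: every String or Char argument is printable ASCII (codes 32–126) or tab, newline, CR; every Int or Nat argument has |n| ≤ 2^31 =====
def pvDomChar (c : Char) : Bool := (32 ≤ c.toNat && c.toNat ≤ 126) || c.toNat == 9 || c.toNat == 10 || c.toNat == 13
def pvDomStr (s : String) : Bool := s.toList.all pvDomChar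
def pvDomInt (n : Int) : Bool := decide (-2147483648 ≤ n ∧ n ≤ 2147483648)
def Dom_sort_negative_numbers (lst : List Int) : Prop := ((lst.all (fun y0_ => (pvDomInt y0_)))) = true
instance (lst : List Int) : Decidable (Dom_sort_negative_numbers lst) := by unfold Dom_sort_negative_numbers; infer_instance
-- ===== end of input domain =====

-- B replaces A's hand-written bubble sort of the filtered negatives with one call to the
-- built-in sorted(), an asymptotically faster library sort (objective: faster).

-- ===== PORT A =====
-- one bubble-sort comparison/swap at index j; getD's default 0 is never used: j+1 is
-- always in range wherever the loops below call it (Python indexing raises out of range,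
-- these calls never are)
def bubbleStep (a : List Int) (j : Nat) : List Int :=
  if a.getD j 0 > a.getD (j + 1) 0 then
    (a.set j (a.getD (j + 1) 0)).set (j + 1) (a.getD j 0)
  else a

-- inner loop: for j in range(m)
def innerLoop (a : List Int) (m : Nat) : List Int :=
  (List.range m).foldl bubbleStep a

def sort_negative_numbers (lst : List Int) : List Int :=
  let negative_nums := lst.filter (fun num => decide (num < 0))
  let n := negative_nums.length
  (List.range (n - 1)).foldl (fun a i => innerLoop a (n - i - 1)) negative_nums

-- ===== PORT B =====
def sort_negative_numbers_alt (lst : List Int) : List Int :=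
  PySem.List.sorted (lst.filter (fun num => decide (num < 0))) (fun x => x) false

-- ===== PRECONDITION & SPEC =====
def Spec_sort_negative_numbers (lst : List Int) (out : List Int) : Prop := out = sort_negative_numbers_alt lst
instance (lst : List Int) (out : List Int) : Decidable (Spec_sort_negative_numbers lst out) := by unfold Spec_sort_negative_numbers; infer_instance

-- ===== CLAIM (what is proved, stated in full; the proofs are below) =====
def Claim_equal_sort_negative_numbers : Prop := ∀ (lst : List Int), Dom_sort_negative_numbers lst → Spec_sort_negative_numbers lst (sort_negative_numbers lst)

-- ===== LEMMAS AND PROOFS =====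

-- structural characterisation of one inner pass of A's bubble sort
def pass1 : List Int → List Int
  | [] => []
  | [x] => [x]
  | x :: y :: r => if x > y then y :: pass1 (x :: r) else x :: pass1 (y :: r)

theorem bubbleStep_cons_succ (h : Int) (t : List Int) (j : Nat) :
    bubbleStep (h :: t) (j + 1) = h :: bubbleStep t j := by
  simp [bubbleStep]
  split <;> rfl

theorem foldl_bubbleStep_map_succ (l : List Nat) (h : Int) (t : List Int) :
    List.foldl bubbleStep (h :: t) (l.map Nat.succ) = h :: List.foldl bubbleStep t l := by
  induction l generalizing t with
  | nil => rfl
  | cons j l ih => simp [List.foldl, bubbleStep_cons_succ, ih]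

theorem innerLoop_eq_pass1 (m : Nat) (a : List Int) (hm : m < a.length) :
    innerLoop a m = pass1 (a.take (m + 1)) ++ a.drop (m + 1) := by
  induction m generalizing a with
  | zero =>
    cases a with
    | nil => simp at hm
    | cons x t => simp [innerLoop, pass1]
  | succ m ih =>
    match a with
    | x :: y :: t =>
      have hm' : m < (x :: t).length := by simp at hm ⊢; omega
      have hstep : innerLoop (x :: y :: t) (m + 1)
          = List.foldl bubbleStep (bubbleStep (x :: y :: t) 0) ((List.range m).map Nat.succ) := by
        simp [innerLoop, List.range_succ_eq_map]
      by_cases hxy : x > y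
      · have h0 : bubbleStep (x :: y :: t) 0 = y :: x :: t := by
          simp [bubbleStep, hxy]
        rw [hstep, h0, foldl_bubbleStep_map_succ]
        have := ih (x :: t) hm'
        simp only [innerLoop] at this
        rw [this]
        simp [pass1, hxy]
      · have h0 : bubbleStep (x :: y :: t) 0 = x :: y :: t := by
          simp [bubbleStep, hxy]
        have hm'' : m < (y :: t).length := by simpa using hm'
        rw [hstep, h0]
        have hsh : List.foldl bubbleStep (x :: y :: t) ((List.range m).map Nat.succ)
            = x :: List.foldl bubbleStep (y :: t) (List.range m) := foldl_bubbleStep_map_succ _ _ _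
        rw [hsh]
        have := ih (y :: t) hm''
        simp only [innerLoop] at this
        rw [this]
        simp [pass1, hxy]
    | [] => simp at hm
    | [x] => simp at hm

theorem pass1_perm (l : List Int) : (pass1 l).Perm l := by
  induction l using pass1.induct with
  | case1 => simp [pass1]
  | case2 x => simp [pass1]
  | case3 x y r h ih =>
    simp only [pass1, if_pos h]
    exact ((ih.cons y).trans (List.Perm.swap x y r))
  | case4 x y r h ih =>
    simp only [pass1, if_neg h]
    exact ih.cons x

theorem pass1_last (l : List Int) (hl : l ≠ []) :
    ∃ c M, pass1 l = c ++ [M] ∧ c.length + 1 = l.length ∧ ∀ z ∈ l, z ≤ M := by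
  induction l using pass1.induct with
  | case1 => simp at hl
  | case2 x => exact ⟨[], x, by simp [pass1]⟩
  | case3 x y r h ih =>
    obtain ⟨c, M, hc, hlen, hmax⟩ := ih (by simp)
    refine ⟨y :: c, M, by simp [pass1, if_pos h, hc], by simp at hlen ⊢; omega, ?_⟩
    intro z hz
    simp only [List.mem_cons] at hz
    rcases hz with rfl | rfl | hz
    · exact hmax z (by simp)
    · exact le_trans (le_of_lt h) (hmax x (by simp))
    · exact hmax z (by simp [hz])
  | case4 x y r h ih =>
    obtain ⟨c, M, hc, hlen, hmax⟩ := ih (by simp)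
    refine ⟨x :: c, M, by simp [pass1, if_neg h, hc], by simp at hlen ⊢; omega, ?_⟩
    intro z hz
    simp only [List.mem_cons] at hz
    rcases hz with rfl | rfl | hz
    · exact le_trans (by omega : z ≤ y) (hmax y (by simp))
    · exact hmax z (by simp)
    · exact hmax z (by simp [hz])

theorem innerLoop_full (a : List Int) (k : Nat) (hk : a.length = k + 1) :
    innerLoop a k = pass1 a := by
  rw [innerLoop_eq_pass1 k a (by omega)]
  rw [List.take_of_length_le (by omega), List.drop_of_length_le (by omega)]
  simp

theorem length_innerLoop (a : List Int) (m : Nat) (hm : m < a.length) :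
    (innerLoop a m).length = a.length := by
  rw [innerLoop_eq_pass1 m a hm]
  have := (pass1_perm (a.take (m + 1))).length_eq
  simp [this]
  omega

theorem innerLoop_append_last (c : List Int) (M : Int) (m : Nat) (hm : m < c.length) :
    innerLoop (c ++ [M]) m = innerLoop c m ++ [M] := by
  rw [innerLoop_eq_pass1 m (c ++ [M]) (by simp; omega), innerLoop_eq_pass1 m c hm]
  rw [List.take_append_of_le_length (by omega), List.drop_append_of_le_length (by omega)]
  simp

theorem foldl_inner_append (f : Nat → Nat) (l : List Nat) (c : List Int) (M : Int)
    (h : ∀ i ∈ l, f i < c.length) :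
    List.foldl (fun b i => innerLoop b (f i)) (c ++ [M]) l
      = List.foldl (fun b i => innerLoop b (f i)) c l ++ [M] := by
  induction l generalizing c with
  | nil => rfl
  | cons i l ih =>
    simp only [List.foldl]
    rw [innerLoop_append_last c M (f i) (h i (by simp))]
    exact ih (innerLoop c (f i)) (fun j hj => by
      rw [length_innerLoop c (f i) (h i (by simp))]; exact h j (by simp [hj]))

theorem bubble_sorts (k : Nat) (a : List Int) (hk : a.length = k) :
    ((List.range (k - 1)).foldl (fun b i => innerLoop b (k - i - 1)) a).Perm a ∧
    ((List.range (k - 1)).foldl (fun b i => innerLoop b (k - i - 1)) a).Pairwise (· ≤ ·) := by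
  induction k using Nat.strong_induction_on generalizing a with
  | _ k ih =>
    match k, hk with
    | 0, hk =>
      have : a = [] := List.length_eq_zero_iff.mp hk
      subst this
      simp
    | 1, hk =>
      obtain ⟨x, hx⟩ : ∃ x, a = [x] := List.length_eq_one_iff.mp hk
      subst hx
      simp
    | (k' + 2), hk =>
      have hne : a ≠ [] := by intro h; subst h; simp at hk
      obtain ⟨c, M, hc, hlen, hmax⟩ := pass1_last a hne
      have hclen : c.length = k' + 1 := by omega
      have hrange : List.range (k' + 2 - 1) = 0 :: (List.range k').map Nat.succ :=
        List.range_succ_eq_map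
      have hfirst : innerLoop a (k' + 2 - 0 - 1) = c ++ [M] := by
        rw [← hc]; exact innerLoop_full a (k' + 1) (by omega)
      have hfun : (fun (b : List Int) (i : Nat) => innerLoop b (k' + 2 - Nat.succ i - 1))
          = (fun b i => innerLoop b (k' - i)) := by
        funext b i; congr 1; omega
      have hfun2 : (fun (b : List Int) (i : Nat) => innerLoop b (k' + 1 - i - 1))
          = (fun b i => innerLoop b (k' - i)) := by
        funext b i; congr 1; omega
      have hsplit : (List.range (k' + 2 - 1)).foldl (fun b i => innerLoop b (k' + 2 - i - 1)) a
          = (List.range k').foldl (fun b i => innerLoop b (k' - i)) c ++ [M] := by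
        rw [hrange]
        simp only [List.foldl_cons, List.foldl_map]
        rw [hfirst, hfun]
        exact foldl_inner_append (fun i => k' - i) (List.range k') c M
          (fun i _ => by simp only [hclen]; omega)
      have hih := ih (k' + 1) (by omega) c hclen
      rw [hfun2] at hih
      simp only [Nat.add_sub_cancel] at hih
      set L := (List.range k').foldl (fun b i => innerLoop b (k' - i)) c with hL
      have hmemM : ∀ z ∈ L, z ≤ M := by
        intro z hz
        have hzc : z ∈ c := hih.1.mem_iff.mp hz
        have : z ∈ pass1 a := by rw [hc]; simp [hzc]
        exact hmax z ((pass1_perm a).mem_iff.mp this)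
      rw [hsplit]
      constructor
      · exact ((hih.1.append_right [M]).trans (by rw [← hc]; exact pass1_perm a))
      · rw [List.pairwise_append]
        exact ⟨hih.2, by simp, fun z hz w hw => by
          simp only [List.mem_singleton] at hw; subst hw; exact hmemM z hz⟩

-- ===== VERDICT (by name: the statement is the Claim_ definition above) =====
theorem sort_negative_numbers_spec : Claim_equal_sort_negative_numbers := by
  intro lst _
  unfold Spec_sort_negative_numbers sort_negative_numbers sort_negative_numbers_alt
  have h := bubble_sorts (lst.filter (fun num => decide (num < 0))).length
      (lst.filter (fun num => decide (num < 0))) rfl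
  exact (PySem.List.sorted_id_eq_of_perm_of_pairwise _ _ h.1 h.2).symm
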